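-- pv_equiv track=rewrite | github.com/ChoiBongGeun/code_practice | 힙/3.이중우선순위큐.py | solution
-- ===== SOURCE A (Python) =====
-- def solution(operations):
--     answer = []
--     operationslist=[] #숫자를 넣어주고 빼줄 리스트 하나 생성
--     for i in range(len(operations)):
--         operation=operations[i].split(' ')#operation을 그냥 operations[i][0]이런식으로 진행할려니 -가 붙을시 하나씩 늘어나는것이 힘들어서 split해주었다
--         if operation[0] == 'I':
--             operationslist.append(int(operation[1]))
--         elif operationslist:
--             if operations[i] == 'D -1':#전체를 보는것이 더 편한듯 해서 그냥 operations[i]로 해주었다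
--                 operationslist.remove(min(operationslist))#-1이기 때문에 최소값제거
--             else:
--                 operationslist.remove(max(operationslist))#아닌 경우는 D 1밖에 없기 때문에 최대값 제거
--         else:
--             continue
--     if not operationslist: #위에 정돈된 리스트가 비었을시 0,0을 answer에 입력
--         answer =[0,0]
--     else:
--         answer = [max(operationslist),min(operationslist)] #아닌경우 max와 min을 찾아서 정렬해준다
--     return answer
-- ===== SOURCE B (Python) =====
-- def solution(operations):
--     s = []  # invariant: s is kept sorted ascending, so min = s[0], max = s[-1]
--     for op in operations:
--         t = op.split(' ')
--         if t[0] == 'I':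
--             x = int(t[1])
--             j = 0
--             while j < len(s) and s[j] <= x:
--                 j += 1
--             s.insert(j, x)
--         elif s:
--             if op == 'D -1':
--                 s = s[1:]
--             else:
--                 s = s[:-1]
--     return [0, 0] if not s else [s[-1], s[0]]
-- ===== Notes on version B (the rewrite author's own statement) =====
-- stated objective: alternative
-- what changed: B maintains the multiset as a sorted list (linear ordered insert, delete min/max by slicing off an end) instead of A's unsorted list with min()/max() scans plus list.remove, so the final answer is read off the two ends.
import Mathlib
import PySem

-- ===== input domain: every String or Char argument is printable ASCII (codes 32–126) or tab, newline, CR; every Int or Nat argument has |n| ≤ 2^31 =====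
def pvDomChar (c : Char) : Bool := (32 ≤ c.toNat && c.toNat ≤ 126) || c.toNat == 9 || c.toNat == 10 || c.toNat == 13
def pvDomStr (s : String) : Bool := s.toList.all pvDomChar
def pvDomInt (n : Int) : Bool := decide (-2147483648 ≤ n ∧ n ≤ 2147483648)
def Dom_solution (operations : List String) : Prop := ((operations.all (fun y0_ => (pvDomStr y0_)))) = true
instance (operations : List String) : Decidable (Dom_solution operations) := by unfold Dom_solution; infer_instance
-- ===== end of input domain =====

-- B keeps the multiset as a sorted list (ordered insert; delete-min/max = drop an end) instead of
-- A's unsorted list with min()/max() scans and remove; equal final [max,min] is proved on Pre_.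

-- ===== PORT A =====
def stepA (l : List Int) (op : String) : List Int :=
  let t := (PySem.Str.split? op " ").getD []
  if t.head? = some "I" then
    l ++ [((t[1]?.bind PySem.Int.ofStr?).getD 0)]
  else if l ≠ [] then
    if op = "D -1" then
      match PySem.List.min? l (fun x => x) with
      | some m => (PySem.List.remove? l m).getD l
      | none => l
    else
      match PySem.List.max? l (fun x => x) with
      | some m => (PySem.List.remove? l m).getD l
      | none => l
  else l

def solution (operations : List String) : List Int :=
  let l := operations.foldl stepA []
  if l = [] then [0, 0]
  else [(PySem.List.max? l (fun x => x)).getD 0, (PySem.List.min? l (fun x => x)).getD 0]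

-- ===== PORT B =====
-- Source B's while-loop scan + insert: walk past elements ≤ x, put x there
def insSorted (x : Int) : List Int → List Int
  | [] => [x]
  | a :: t => if a ≤ x then a :: insSorted x t else x :: a :: t

def stepB (s : List Int) (op : String) : List Int :=
  let t := (PySem.Str.split? op " ").getD []
  if t.head? = some "I" then
    insSorted ((t[1]?.bind PySem.Int.ofStr?).getD 0) s
  else if s ≠ [] then
    if op = "D -1" then s.tail else s.dropLast
  else s

def solution_alt (operations : List String) : List Int :=
  let s := operations.foldl stepB []
  if s = [] then [0, 0]
  else [s.getLast?.getD 0, s.head?.getD 0]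

-- ===== PRECONDITION & SPEC =====
-- Pre_ excludes exactly the inputs where Python A raises: an 'I' operation whose second
-- token is missing (IndexError) or is not a valid int literal (ValueError).
def Pre_solution (operations : List String) : Prop :=
  ∀ op ∈ operations,
    ((PySem.Str.split? op " ").getD []).head? = some "I" →
      ((((PySem.Str.split? op " ").getD [])[1]?).bind PySem.Int.ofStr?).isSome = true
instance (operations : List String) : Decidable (Pre_solution operations) := by
  unfold Pre_solution; infer_instance

def pvWitness_solution : List String := ["I 16", "I -5643", "D -1", "I 123", "D 1", "D 1", "I 7"]

def Spec_solution (operations : List String) (out : List Int) : Prop := out = solution_alt operations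
instance (operations : List String) (out : List Int) : Decidable (Spec_solution operations out) := by unfold Spec_solution; infer_instance

-- ===== CLAIM (what is proved, stated in full; the proofs are below) =====
def Claim_equal_solution : Prop := ∀ (operations : List String), Dom_solution operations → Pre_solution operations → Spec_solution operations (solution operations)

-- ===== LEMMAS AND PROOFS =====

theorem insSorted_perm (x : Int) (s : List Int) : (insSorted x s).Perm (x :: s) := by
  induction s with
  | nil => simp [insSorted]
  | cons a t ih =>
    simp only [insSorted]
    split
    · exact ((ih.cons a).trans (List.Perm.swap x a t))
    · exact List.Perm.refl _

theorem insSorted_pairwise (x : Int) (s : List Int) (hs : s.Pairwise (· ≤ ·)) :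
    (insSorted x s).Pairwise (· ≤ ·) := by
  induction s with
  | nil => simp [insSorted]
  | cons a t ih =>
    rcases List.pairwise_cons.1 hs with ⟨ha, ht⟩
    simp only [insSorted]
    split
    · rename_i hax
      refine List.pairwise_cons.2 ⟨?_, ih ht⟩
      intro b hb
      rcases List.mem_cons.1 ((insSorted_perm x t).mem_iff.1 hb) with h | h
      · exact h ▸ hax
      · exact ha b h
    · rename_i hax
      refine List.pairwise_cons.2 ⟨?_, hs⟩
      intro b hb
      rcases List.mem_cons.1 hb with h | h
      · omega
      · exact le_of_lt (lt_of_lt_of_le (by omega) (ha b h))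

-- head of the sorted twin is A's min (first minimal element of the permuted list has the same value)
theorem min_eq_head (la : List Int) (a : Int) (t : List Int)
    (hp : la.Perm (a :: t)) (hs : (a :: t).Pairwise (· ≤ ·)) (m : Int)
    (hm : PySem.List.min? la (fun x => x) = some m) : m = a := by
  have hmem : m ∈ la := PySem.List.min?_mem hm
  have hmin := PySem.List.min?_isMin hm
  have ha : a ∈ la := hp.mem_iff.2 (List.mem_cons_self)
  have h1 : m ≤ a := hmin a ha
  have h2 : a ≤ m := by
    rcases List.mem_cons.1 (hp.mem_iff.1 hmem) with h | h
    · omega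
    · exact (List.pairwise_cons.1 hs).1 m h
  omega

theorem max_eq_getLast (la sb : List Int) (hne : sb ≠ [])
    (hp : la.Perm sb) (hs : sb.Pairwise (· ≤ ·)) (m : Int)
    (hm : PySem.List.max? la (fun x => x) = some m) : m = sb.getLast hne := by
  have hmem : m ∈ la := PySem.List.max?_mem hm
  have hmax := PySem.List.max?_isMax hm
  have hg : sb.getLast hne ∈ la := hp.mem_iff.2 (List.getLast_mem hne)
  have h1 : sb.getLast hne ≤ m := hmax _ hg
  have h2 : m ≤ sb.getLast hne := by
    have := hs.rel_getLast_of_rel_getLast_getLast (hp.mem_iff.1 hmem) (le_refl _)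
    simpa using this
  omega

theorem erase_append_singleton_perm (u : List Int) (v : Int) :
    ((u ++ [v]).erase v).Perm u := by
  have h : (u ++ [v]).Perm (v :: u) := by
    simpa using (List.perm_append_comm (l₁ := u) (l₂ := [v]))
  simpa using h.erase v

theorem step_inv (op : String) (la sb : List Int)
    (hp : la.Perm sb) (hs : sb.Pairwise (· ≤ ·)) :
    (stepA la op).Perm (stepB sb op) ∧ (stepB sb op).Pairwise (· ≤ ·) := by
  unfold stepA stepB
  set t := (PySem.Str.split? op " ").getD [] with ht
  by_cases hI : t.head? = some "I"
  · rw [if_pos hI, if_pos hI]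
    set x := ((t[1]?.bind PySem.Int.ofStr?).getD 0) with hx
    constructor
    · exact ((List.perm_append_comm).trans (hp.cons x)).trans (insSorted_perm x sb).symm
    · exact insSorted_pairwise x sb hs
  · rw [if_neg hI, if_neg hI]
    by_cases hne : la = []
    · have : sb = [] := List.Perm.eq_nil (hne ▸ hp.symm)
      subst hne this
      simp
    · have hsbne : sb ≠ [] := fun h => hne (List.Perm.eq_nil (h ▸ hp))
      rw [if_pos hne, if_pos hsbne]
      rcases List.exists_cons_of_ne_nil hsbne with ⟨a, tl, hsb⟩
      by_cases hD : op = "D -1"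
      · rw [if_pos hD, if_pos hD]
        obtain ⟨m, hm⟩ : ∃ m, PySem.List.min? la (fun x => x) = some m := by
          cases hmm : PySem.List.min? la (fun x => x) with
          | none => exact absurd ((PySem.List.min?_eq_none_iff _ _).1 hmm) hne
          | some m => exact ⟨m, rfl⟩
        have hma : m = a := min_eq_head la a tl (hsb ▸ hp) (hsb ▸ hs) m hm
        have hmem : m ∈ la := PySem.List.min?_mem hm
        simp only [hm, PySem.List.remove?_eq_some_erase la m hmem, Option.getD_some]
        subst hsb
        refine ⟨?_, ?_⟩
        · have h1 : (la.erase m).Perm ((a :: tl).erase m) := hp.erase m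
          have h2 : (a :: tl).erase m = tl := by rw [hma]; simp
          simpa [h2] using h1
        · simpa using (List.pairwise_cons.1 hs).2
      · rw [if_neg hD, if_neg hD]
        obtain ⟨m, hm⟩ : ∃ m, PySem.List.max? la (fun x => x) = some m := by
          cases hmm : PySem.List.max? la (fun x => x) with
          | none => exact absurd ((PySem.List.max?_eq_none_iff _ _).1 hmm) hne
          | some m => exact ⟨m, rfl⟩
        have hml : m = sb.getLast hsbne := max_eq_getLast la sb hsbne hp hs m hm
        have hmem : m ∈ la := PySem.List.max?_mem hm
        simp only [hm, PySem.List.remove?_eq_some_erase la m hmem, Option.getD_some]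
        constructor
        · have hdl : sb = sb.dropLast ++ [sb.getLast hsbne] := (List.dropLast_concat_getLast hsbne).symm
          refine (hp.erase m).trans ?_
          calc sb.erase m = (sb.dropLast ++ [sb.getLast hsbne]).erase m := by rw [← hdl]
            _ = (sb.dropLast ++ [m]).erase m := by rw [hml]
          exact erase_append_singleton_perm sb.dropLast m
        · exact hs.sublist (List.dropLast_sublist _)

theorem loop_inv (ops : List String) (la sb : List Int)
    (hp : la.Perm sb) (hs : sb.Pairwise (· ≤ ·)) :
    (ops.foldl stepA la).Perm (ops.foldl stepB sb) ∧ (ops.foldl stepB sb).Pairwise (· ≤ ·) := by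
  induction ops generalizing la sb with
  | nil => exact ⟨hp, hs⟩
  | cons op rest ih =>
    obtain ⟨h1, h2⟩ := step_inv op la sb hp hs
    simpa using ih (stepA la op) (stepB sb op) h1 h2

-- ===== VERDICT (by name: the statement is the Claim_ definition above) =====
theorem solution_spec : Claim_equal_solution := by
  intro operations _hdom _hpre
  unfold Spec_solution solution solution_alt
  obtain ⟨hp, hs⟩ := loop_inv operations [] [] (List.Perm.refl _) (by simp)
  set la := operations.foldl stepA [] with hla
  set sb := operations.foldl stepB [] with hsb
  by_cases hne : la = []
  · have : sb = [] := List.Perm.eq_nil (hne ▸ hp.symm)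
    simp [hne, this]
  · have hsbne : sb ≠ [] := fun h => hne (List.Perm.eq_nil (h ▸ hp))
    simp only [if_neg hne, if_neg hsbne]
    rcases List.exists_cons_of_ne_nil hsbne with ⟨a, tl, hsbeq⟩
    obtain ⟨mn, hmn⟩ : ∃ m, PySem.List.min? la (fun x => x) = some m := by
      cases hmm : PySem.List.min? la (fun x => x) with
      | none => exact absurd ((PySem.List.min?_eq_none_iff _ _).1 hmm) hne
      | some m => exact ⟨m, rfl⟩
    obtain ⟨mx, hmx⟩ : ∃ m, PySem.List.max? la (fun x => x) = some m := by
      cases hmm : PySem.List.max? la (fun x => x) with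
      | none => exact absurd ((PySem.List.max?_eq_none_iff _ _).1 hmm) hne
      | some m => exact ⟨m, rfl⟩
    have hmin : mn = a := min_eq_head la a tl (hsbeq ▸ hp) (hsbeq ▸ hs) mn hmn
    have hmax : mx = sb.getLast hsbne := max_eq_getLast la sb hsbne hp hs mx hmx
    rw [hmn, hmx, hmin, hmax]
    rw [List.getLast?_eq_getLast_of_ne_nil hsbne]
    simp [hsbeq]
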